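-- pv_equiv track=rewrite | github.com/OtecOleksiu/Python | clipboard_tts0.py | would_you_speak_them_to_me
-- ===== SOURCE A (Python) =====
-- import string
--
-- def would_you_speak_them_to_me(x):
--     phrase_list = x.split(' ')
--
--     new_list = []
--     for single_word in phrase_list:
--         for eng_letters in list(string.ascii_letters):
--             if eng_letters in single_word:
--                 single_word = f"<lang xml:lang='en-US'>{single_word}</lang>"
--                 break
--         new_list.append(single_word)
--
--     edited_line = ' '.join(new_list)
--
--     return f'<speak>{edited_line}</speak>'
-- ===== SOURCE B (Python) =====
-- import string
--
-- _ASCII = set(string.ascii_letters)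
--
-- def would_you_speak_them_to_me(x):
--     edited_line = ' '.join(
--         f"<lang xml:lang='en-US'>{w}</lang>" if any(c in _ASCII for c in w) else w
--         for w in x.split(' ')
--     )
--     return f'<speak>{edited_line}</speak>'
-- ===== Notes on version B (the rewrite author's own statement) =====
-- stated objective: idiomatic
-- what changed: The per-word letter test no longer iterates the 52-letter alphabet doing substring searches; B scans the word's own characters once against a precomputed set of ASCII letters (any(c in ASCII for c in w)).
import Mathlib
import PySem

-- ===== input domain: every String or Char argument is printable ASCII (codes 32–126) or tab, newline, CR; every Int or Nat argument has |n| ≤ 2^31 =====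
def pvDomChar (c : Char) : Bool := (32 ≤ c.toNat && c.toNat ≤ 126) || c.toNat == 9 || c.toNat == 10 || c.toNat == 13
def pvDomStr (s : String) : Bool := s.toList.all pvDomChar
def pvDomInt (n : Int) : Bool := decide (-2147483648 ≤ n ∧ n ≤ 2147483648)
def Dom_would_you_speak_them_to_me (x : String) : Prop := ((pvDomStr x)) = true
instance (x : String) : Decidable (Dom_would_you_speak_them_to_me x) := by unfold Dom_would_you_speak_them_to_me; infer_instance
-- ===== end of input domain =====

-- B replaces A's 52-iteration alphabet scan with substring searches by a single pass
-- over the word's own characters against a precomputed ASCII-letter set (objective: idiomatic).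


-- string.ascii_letters
def pvAsciiLetters : List Char := "abcdefghijklmnopqrstuvwxyzABCDEFGHIJKLMNOPQRSTUVWXYZ".toList

-- f"<lang xml:lang='en-US'>{w}</lang>"
def pvWrap (w : String) : String := "<lang xml:lang='en-US'>" ++ w ++ "</lang>"

-- ===== PORT A =====
-- inner loop: for eng_letters in list(string.ascii_letters): if eng_letters in single_word: wrap; break
def pvLoopA : List Char → String → String
  | [], w => w
  | c :: rest, w => if PySem.Str.isIn (String.ofList [c]) w then pvWrap w else pvLoopA rest w

def would_you_speak_them_to_me (x : String) : String :=
  let phrase_list := (PySem.Str.split? x " ").getD []      -- x.split(' '), sep nonempty so split? = some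
  let new_list := phrase_list.foldl (fun acc w => acc ++ [pvLoopA pvAsciiLetters w]) []
  "<speak>" ++ PySem.Str.join " " new_list ++ "</speak>"

-- ===== PORT B =====
-- _ASCII = set(string.ascii_letters)
def pvAsciiSet : PySem.Set Char := PySem.Set.ofList pvAsciiLetters

def would_you_speak_them_to_me_alt (x : String) : String :=
  let edited_line := PySem.Str.join " " (((PySem.Str.split? x " ").getD []).map
    (fun w => if w.toList.any (fun c => PySem.Set.contains pvAsciiSet c) then pvWrap w else w))
  "<speak>" ++ edited_line ++ "</speak>"

-- ===== PRECONDITION & SPEC =====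
def Spec_would_you_speak_them_to_me (x : String) (out : String) : Prop := out = would_you_speak_them_to_me_alt x
instance (x : String) (out : String) : Decidable (Spec_would_you_speak_them_to_me x out) := by unfold Spec_would_you_speak_them_to_me; infer_instance

-- ===== CLAIM (what is proved, stated in full; the proofs are below) =====
def Claim_equal_would_you_speak_them_to_me : Prop := ∀ (x : String), Dom_would_you_speak_them_to_me x → Spec_would_you_speak_them_to_me x (would_you_speak_them_to_me x)

-- ===== LEMMAS AND PROOFS =====

-- A's alphabet loop returns wrap w iff some alphabet letter occurs in w
theorem pvLoopA_eq (ls : List Char) (w : String) :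
    pvLoopA ls w = if ls.any (fun c => PySem.Str.isIn (String.ofList [c]) w) then pvWrap w else w := by
  induction ls with
  | nil => simp [pvLoopA]
  | cons c rest ih =>
    simp [pvLoopA, ih]
    by_cases h1 : PySem.Chars.isIn [c] w.toList = true <;>
      by_cases h2 : ∃ x ∈ rest, PySem.Chars.isIn [x] w.toList = true <;>
        simp [h1, h2]

-- the two containment tests agree: "some ASCII letter is a substring of w" = "some char of w is an ASCII letter"
theorem pvAny_eq (w : String) :
    pvAsciiLetters.any (fun c => PySem.Str.isIn (String.ofList [c]) w)
      = w.toList.any (fun c => PySem.Set.contains pvAsciiSet c) := by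
  rw [Bool.eq_iff_iff]
  simp only [List.any_eq_true, PySem.Str.isIn_eq, PySem.Chars.isIn_iff_infix,
    PySem.Set.contains_iff, pvAsciiSet, PySem.Set.mem_ofList]
  constructor
  · rintro ⟨c, hc, hin⟩
    exact ⟨c, (List.singleton_infix_iff c w.toList).mp (by simpa using hin), hc⟩
  · rintro ⟨c, hc, hmem⟩
    exact ⟨c, hmem, by simpa using (List.singleton_infix_iff c w.toList).mpr hc⟩

-- ===== VERDICT (by name: the statement is the Claim_ definition above) =====
theorem would_you_speak_them_to_me_spec : Claim_equal_would_you_speak_them_to_me := by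
  intro x _
  unfold Spec_would_you_speak_them_to_me would_you_speak_them_to_me would_you_speak_them_to_me_alt
  simp only [PySem.List.foldl_append_singleton_eq_map, List.nil_append]
  have hmap : ∀ L : List String, List.map (pvLoopA pvAsciiLetters) L
      = List.map (fun w => if w.toList.any (fun c => PySem.Set.contains pvAsciiSet c) then pvWrap w else w) L :=
    fun L => List.map_congr_left (fun w _ => by rw [pvLoopA_eq, pvAny_eq])
  rw [hmap]
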